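-- pv_equiv track=rewrite | github.com/raccoon641/maya1-fastapi | hf_space/app.py | unpack_snac_from_7
-- ===== SOURCE A (Python) =====
-- CODE_END_TOKEN_ID = 128258
--
-- CODE_TOKEN_OFFSET = 128266
--
-- def unpack_snac_from_7(snac_tokens: list) -> list:
--     """Unpack 7-token SNAC frames to 3 hierarchical levels."""
--     if snac_tokens and snac_tokens[-1] == CODE_END_TOKEN_ID:
--         snac_tokens = snac_tokens[:-1]
--
--     frames = len(snac_tokens) // 7
--     snac_tokens = snac_tokens[:frames * 7]
--
--     if frames == 0:
--         return [[], [], []]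
--
--     l1, l2, l3 = [], [], []
--
--     for i in range(frames):
--         slots = snac_tokens[i*7:(i+1)*7]
--         l1.append((slots[0] - CODE_TOKEN_OFFSET) % 4096)
--         l2.extend([
--             (slots[1] - CODE_TOKEN_OFFSET) % 4096,
--             (slots[4] - CODE_TOKEN_OFFSET) % 4096,
--         ])
--         l3.extend([
--             (slots[2] - CODE_TOKEN_OFFSET) % 4096,
--             (slots[3] - CODE_TOKEN_OFFSET) % 4096,
--             (slots[5] - CODE_TOKEN_OFFSET) % 4096,
--             (slots[6] - CODE_TOKEN_OFFSET) % 4096,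
--         ])
--
--     return [l1, l2, l3]
-- ===== SOURCE B (Python) =====
-- CODE_END_TOKEN_ID = 128258
--
-- CODE_TOKEN_OFFSET = 128266
--
-- def unpack_snac_from_7(snac_tokens: list) -> list:
--     """Unpack 7-token SNAC frames to 3 hierarchical levels (column-wise)."""
--     if snac_tokens and snac_tokens[-1] == CODE_END_TOKEN_ID:
--         snac_tokens = snac_tokens[:-1]
--     frames = len(snac_tokens) // 7
--     norm = [(t - CODE_TOKEN_OFFSET) % 4096 for t in snac_tokens[:frames * 7]]
--     l1 = norm[0::7]
--     l2 = [v for pair in zip(norm[1::7], norm[4::7]) for v in pair]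
--     l3 = [v for grp in zip(norm[2::7], norm[3::7], norm[5::7], norm[6::7]) for v in grp]
--     return [l1, l2, l3]
-- ===== Notes on version B (the rewrite author's own statement) =====
-- stated objective: simpler
-- what changed: Replaces A's per-frame loop (slicing each 7-token frame and appending to three accumulators) with a single normalization map over the truncated token list followed by column-wise strided extraction (norm[k::7] columns zipped and interleaved); the frames==0 special case disappears.
import Mathlib
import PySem

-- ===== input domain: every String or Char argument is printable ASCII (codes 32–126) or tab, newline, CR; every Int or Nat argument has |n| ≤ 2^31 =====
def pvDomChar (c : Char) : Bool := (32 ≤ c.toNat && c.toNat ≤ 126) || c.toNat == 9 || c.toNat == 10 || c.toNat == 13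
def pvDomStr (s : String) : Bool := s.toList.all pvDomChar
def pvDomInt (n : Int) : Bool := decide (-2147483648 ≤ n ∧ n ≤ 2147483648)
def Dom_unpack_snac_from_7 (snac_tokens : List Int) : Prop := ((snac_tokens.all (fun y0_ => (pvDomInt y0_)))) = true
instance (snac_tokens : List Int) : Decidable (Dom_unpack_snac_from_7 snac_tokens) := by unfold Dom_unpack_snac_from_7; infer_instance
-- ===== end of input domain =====

-- B replaces A's per-frame loop with a single normalization map followed by column-wise
-- strided extraction (objective: simpler decomposition; same O(n) cost).

-- ===== PORT A =====
-- loop body of A's `for i in range(frames)` (state = (l1, l2, l3))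
def pvBodyA (ts : List Int) (st : List Int × List Int × List Int) (i : Nat) :
    List Int × List Int × List Int :=
  let slots := PySem.List.slice ts (some ((i * 7 : Nat) : Int)) (some (((i + 1) * 7 : Nat) : Int))
  (st.1 ++ [PySem.Int.mod (PySem.List.pyGetD slots 0 0 - 128266) 4096],
   st.2.1 ++ [PySem.Int.mod (PySem.List.pyGetD slots 1 0 - 128266) 4096,
              PySem.Int.mod (PySem.List.pyGetD slots 4 0 - 128266) 4096],
   st.2.2 ++ [PySem.Int.mod (PySem.List.pyGetD slots 2 0 - 128266) 4096,
              PySem.Int.mod (PySem.List.pyGetD slots 3 0 - 128266) 4096,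
              PySem.Int.mod (PySem.List.pyGetD slots 5 0 - 128266) 4096,
              PySem.Int.mod (PySem.List.pyGetD slots 6 0 - 128266) 4096])

def unpack_snac_from_7 (snac_tokens : List Int) : List (List Int) :=
  let kept := if snac_tokens ≠ [] ∧ PySem.List.pyGetD snac_tokens (-1) 0 = 128258
    then PySem.List.slice snac_tokens none (some (-1)) else snac_tokens
  let frames := kept.length / 7
  let ts := PySem.List.slice kept none (some ((frames * 7 : Nat) : Int))
  if frames = 0 then [[], [], []]
  else
    let st := (List.range frames).foldl (pvBodyA ts) ([], [], [])
    [st.1, st.2.1, st.2.2]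

-- ===== PORT B =====
-- strided column xs[0::7] (and, applied after a drop, xs[k::7])
def pvCol7 : List Int → List Int
  | [] => []
  | a :: rest => a :: pvCol7 (rest.drop 6)
  termination_by xs => xs.length
  decreasing_by simp

def unpack_snac_from_7_alt (snac_tokens : List Int) : List (List Int) :=
  let kept := if snac_tokens ≠ [] ∧ PySem.List.pyGetD snac_tokens (-1) 0 = 128258
    then PySem.List.slice snac_tokens none (some (-1)) else snac_tokens
  let frames := kept.length / 7
  let norm := (kept.take (frames * 7)).map (fun t => PySem.Int.mod (t - 128266) 4096)
  let l1 := pvCol7 norm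
  let l2 := ((pvCol7 (norm.drop 1)).zip (pvCol7 (norm.drop 4))).flatMap
              (fun p => [p.1, p.2])
  let l3 := ((pvCol7 (norm.drop 2)).zip ((pvCol7 (norm.drop 3)).zip
              ((pvCol7 (norm.drop 5)).zip (pvCol7 (norm.drop 6))))).flatMap
              (fun p => [p.1, p.2.1, p.2.2.1, p.2.2.2])
  [l1, l2, l3]

-- ===== PRECONDITION & SPEC =====
def Spec_unpack_snac_from_7 (snac_tokens : List Int) (out : List (List Int)) : Prop := out = unpack_snac_from_7_alt snac_tokens
instance (snac_tokens : List Int) (out : List (List Int)) : Decidable (Spec_unpack_snac_from_7 snac_tokens out) := by unfold Spec_unpack_snac_from_7; infer_instance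

-- ===== CLAIM (what is proved, stated in full; the proofs are below) =====
def Claim_equal_unpack_snac_from_7 : Prop := ∀ (snac_tokens : List Int), Dom_unpack_snac_from_7 snac_tokens → Spec_unpack_snac_from_7 snac_tokens (unpack_snac_from_7 snac_tokens)

-- ===== LEMMAS AND PROOFS =====

def pvG (t : Int) : Int := PySem.Int.mod (t - 128266) 4096

def pvL2 (xs : List Int) : List Int :=
  ((pvCol7 (xs.drop 1)).zip (pvCol7 (xs.drop 4))).flatMap (fun p => [p.1, p.2])

def pvL3 (xs : List Int) : List Int :=
  ((pvCol7 (xs.drop 2)).zip ((pvCol7 (xs.drop 3)).zip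
    ((pvCol7 (xs.drop 5)).zip (pvCol7 (xs.drop 6))))).flatMap
    (fun p => [p.1, p.2.1, p.2.2.1, p.2.2.2])

theorem pvCol7_nil : pvCol7 [] = [] := by rw [pvCol7.eq_def]

theorem pvCol7_cons (a : Int) (xs : List Int) :
    pvCol7 (a :: xs) = a :: pvCol7 (xs.drop 6) := by
  conv_lhs => rw [pvCol7.eq_def]

theorem pvL2_seven (x0 x1 x2 x3 x4 x5 x6 : Int) (xs : List Int) :
    pvL2 (x0 :: x1 :: x2 :: x3 :: x4 :: x5 :: x6 :: xs) = x1 :: x4 :: pvL2 xs := by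
  simp [pvL2, pvCol7_cons]

theorem pvL3_seven (x0 x1 x2 x3 x4 x5 x6 : Int) (xs : List Int) :
    pvL3 (x0 :: x1 :: x2 :: x3 :: x4 :: x5 :: x6 :: xs) = x2 :: x3 :: x5 :: x6 :: pvL3 xs := by
  simp [pvL3, pvCol7_cons]

theorem pvSliceFrame (ts : List Int) (i : Nat) :
    PySem.List.slice ts (some ((i * 7 : Nat) : Int)) (some (((i + 1) * 7 : Nat) : Int)) =
      (ts.drop (i * 7)).take 7 := by
  rw [PySem.List.slice_natCast]; congr 1; omega

theorem pvBodyA_zero (t0 t1 t2 t3 t4 t5 t6 : Int) (rest : List Int)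
    (st : List Int × List Int × List Int) :
    pvBodyA (t0 :: t1 :: t2 :: t3 :: t4 :: t5 :: t6 :: rest) st 0 =
      (st.1 ++ [pvG t0], st.2.1 ++ [pvG t1, pvG t4],
       st.2.2 ++ [pvG t2, pvG t3, pvG t5, pvG t6]) := by
  simp only [pvBodyA]
  rw [pvSliceFrame]
  simp [pvG, PySem.List.pyGetD_ofNat']

theorem pvBodyA_succ (t0 t1 t2 t3 t4 t5 t6 : Int) (rest : List Int)
    (st : List Int × List Int × List Int) (i : Nat) :
    pvBodyA (t0 :: t1 :: t2 :: t3 :: t4 :: t5 :: t6 :: rest) st (i + 1) =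
      pvBodyA rest st i := by
  simp only [pvBodyA]
  rw [pvSliceFrame _ (i + 1), pvSliceFrame rest i]
  have hd : (t0 :: t1 :: t2 :: t3 :: t4 :: t5 :: t6 :: rest).drop ((i + 1) * 7) =
      rest.drop (i * 7) := by
    rw [show (i + 1) * 7 = i * 7 + 7 by ring, ← List.drop_drop]
    simp
  rw [hd]

theorem pvMain (n : Nat) : ∀ (ts : List Int), ts.length = 7 * n →
    ∀ (a1 a2 a3 : List Int),
    (List.range n).foldl (pvBodyA ts) (a1, a2, a3) =
      (a1 ++ pvCol7 (ts.map pvG), a2 ++ pvL2 (ts.map pvG), a3 ++ pvL3 (ts.map pvG)) := by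
  induction n with
  | zero =>
    intro ts h a1 a2 a3
    have : ts = [] := List.eq_nil_of_length_eq_zero (by omega)
    subst this
    simp [pvCol7_nil, pvL2, pvL3]
  | succ n ih =>
    intro ts h a1 a2 a3
    obtain ⟨t0, t1, t2, t3, t4, t5, t6, rest, rfl⟩ :
        ∃ t0 t1 t2 t3 t4 t5 t6 rest, ts = t0 :: t1 :: t2 :: t3 :: t4 :: t5 :: t6 :: rest := by
      rcases ts with _ | ⟨t0, _ | ⟨t1, _ | ⟨t2, _ | ⟨t3, _ | ⟨t4, _ | ⟨t5, _ | ⟨t6, rest⟩⟩⟩⟩⟩⟩⟩ <;>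
        first
        | exact ⟨_, _, _, _, _, _, _, _, rfl⟩
        | (simp at h; done)
        | (simp at h; omega)
    have hrest : rest.length = 7 * n := by simp at h; omega
    rw [List.range_succ_eq_map]
    simp only [List.foldl_cons, List.foldl_map, Nat.succ_eq_add_one]
    have hfun : (fun (st : List Int × List Int × List Int) (i : Nat) =>
        pvBodyA (t0 :: t1 :: t2 :: t3 :: t4 :: t5 :: t6 :: rest) st (i + 1)) =
        fun st i => pvBodyA rest st i := by
      funext st i; exact pvBodyA_succ t0 t1 t2 t3 t4 t5 t6 rest st i
    rw [hfun, pvBodyA_zero, ih rest hrest]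
    simp [pvCol7_cons, pvL2_seven, pvL3_seven]

theorem unpack_spec_aux (snac_tokens : List Int) :
    unpack_snac_from_7 snac_tokens = unpack_snac_from_7_alt snac_tokens := by
  unfold unpack_snac_from_7 unpack_snac_from_7_alt
  set kept := if snac_tokens ≠ [] ∧ PySem.List.pyGetD snac_tokens (-1) 0 = 128258
    then PySem.List.slice snac_tokens none (some (-1)) else snac_tokens with hkept
  simp only []
  set frames := kept.length / 7 with hframes
  by_cases h0 : frames = 0
  · have hlen : kept.length < 7 := by
      rw [hframes] at h0
      omega
    simp [h0, pvCol7_nil]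
  · have hle : frames * 7 ≤ kept.length := by
      have := Nat.div_mul_le_self kept.length 7
      omega
    have hts : (PySem.List.slice kept none (some ((frames * 7 : Nat) : Int))) =
        kept.take (frames * 7) := PySem.List.slice_to_natCast kept (frames * 7)
    have hlen : (kept.take (frames * 7)).length = 7 * frames := by
      simp [List.length_take]; omega
    rw [if_neg h0, hts]
    rw [pvMain frames (kept.take (frames * 7)) hlen [] [] []]
    have hg : (fun t : Int => PySem.Int.mod (t - 128266) 4096) = pvG := rfl
    rw [hg]
    simp only [pvL2, pvL3, List.nil_append]

-- ===== VERDICT (by name: the statement is the Claim_ definition above) =====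
theorem unpack_snac_from_7_spec : Claim_equal_unpack_snac_from_7 := by
  intro snac_tokens _
  exact unpack_spec_aux snac_tokens
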